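-- pv_equiv track=rewrite | github.com/fccc100/Leetcode | 2501-3000/2560-打家劫舍Ⅳ/python-2560/Solution.py | check
-- ===== SOURCE A (Python) =====
-- def check(nums, mid, k):
--     n, cnt, prev = len(nums), 0, -2
--     for i in range(0, n):
--         if nums[i] <= mid:
--             if i - prev > 1:
--                 cnt += 1
--                 prev = i
--     return cnt >= k
-- ===== SOURCE B (Python) =====
-- def check(nums, mid, k):
--     # DP over the list: maximum number of non-adjacent picks among elements <= mid.
--     prev2 = prev1 = 0
--     for x in nums:
--         prev2, prev1 = prev1, (prev1 if x > mid else max(prev1, prev2 + 1))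
--     return prev1 >= k
-- ===== Notes on version B (the rewrite author's own statement) =====
-- stated objective: alternative
-- what changed: Replaces the greedy gap-counting loop over indices (tracking the last picked index prev) with a two-variable rolling dynamic program computing the maximum number of non-adjacent elements <= mid.
import Mathlib
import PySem

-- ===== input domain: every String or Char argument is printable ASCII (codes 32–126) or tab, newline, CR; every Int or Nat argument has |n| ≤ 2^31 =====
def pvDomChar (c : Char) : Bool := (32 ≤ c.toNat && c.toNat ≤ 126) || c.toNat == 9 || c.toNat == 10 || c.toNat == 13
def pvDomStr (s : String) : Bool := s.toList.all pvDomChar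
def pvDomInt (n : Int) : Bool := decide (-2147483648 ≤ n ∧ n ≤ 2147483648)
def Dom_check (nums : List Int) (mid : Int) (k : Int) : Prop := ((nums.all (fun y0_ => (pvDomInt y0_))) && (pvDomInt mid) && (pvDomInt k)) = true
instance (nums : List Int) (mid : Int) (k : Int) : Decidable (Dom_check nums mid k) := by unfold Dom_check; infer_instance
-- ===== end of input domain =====

-- B replaces A's greedy gap-counting (tracking the last picked index) with a two-variable
-- rolling DP for the maximum number of non-adjacent elements ≤ mid (objective: alternative).

-- ===== PORT A =====
-- the 'for i in range(0, n)' loop: structural recursion over the list with the index i carried along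
def checkGo (mid : Int) : List Int → Int → Int → Int → Int
  | [], _, cnt, _ => cnt
  | x :: rest, i, cnt, prev =>
    if x ≤ mid then
      if i - prev > 1 then checkGo mid rest (i + 1) (cnt + 1) i
      else checkGo mid rest (i + 1) cnt prev
    else checkGo mid rest (i + 1) cnt prev

def check (nums : List Int) (mid : Int) (k : Int) : Bool :=
  decide (checkGo mid nums 0 0 (-2) ≥ k)

-- ===== PORT B =====
def check_alt (nums : List Int) (mid : Int) (k : Int) : Bool :=
  let st := nums.foldl
    (fun (st : Int × Int) x => (st.2, if x > mid then st.2 else max st.2 (st.1 + 1)))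
    (0, 0)
  decide (st.2 ≥ k)

-- ===== PRECONDITION & SPEC =====
def Spec_check (nums : List Int) (mid : Int) (k : Int) (out : Bool) : Prop := out = check_alt nums mid k
instance (nums : List Int) (mid : Int) (k : Int) (out : Bool) : Decidable (Spec_check nums mid k out) := by unfold Spec_check; infer_instance

-- ===== CLAIM (what is proved, stated in full; the proofs are below) =====
def Claim_equal_check : Prop := ∀ (nums : List Int) (mid : Int) (k : Int), Dom_check nums mid k → Spec_check nums mid k (check nums mid k)

-- ===== LEMMAS AND PROOFS =====

-- Loop invariant tying the greedy state (cnt, prev) after the first i elements to the DP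
-- pair (p2, p1) = (dp[i-2], dp[i-1]): p1 equals the greedy count, p2 is one less exactly
-- when the greedy picked index i-1, and the last picked index is at most i-1.
theorem checkGo_eq_foldl (mid : Int) (l : List Int) (i cnt prev p2 p1 : Int)
    (h1 : p1 = cnt) (h2 : p2 = cnt - (if prev = i - 1 then 1 else 0)) (h3 : prev ≤ i - 1) :
    checkGo mid l i cnt prev =
      (l.foldl (fun (st : Int × Int) x => (st.2, if x > mid then st.2 else max st.2 (st.1 + 1)))
        (p2, p1)).2 := by
  induction l generalizing i cnt prev p2 p1 with
  | nil => simpa [checkGo] using h1.symm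
  | cons x rest ih =>
    simp only [checkGo, List.foldl_cons]
    by_cases hle : x ≤ mid
    · have hx : ¬ x > mid := by omega
      simp only [if_pos hle, if_neg hx]
      by_cases hprev : prev = i - 1
      · -- x ≤ mid but adjacent to the last pick: greedy skips, DP keeps the same value
        have hgap : ¬ i - prev > 1 := by omega
        rw [if_neg hgap]
        have h2' : p2 = cnt - 1 := by simpa [hprev] using h2
        have hm : max p1 (p2 + 1) = p1 := by omega
        rw [hm]
        refine ih (i + 1) cnt prev p1 p1 h1 ?_ (by omega)
        have hne : ¬ prev = (i + 1) - 1 := by omega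
        rw [if_neg hne]; omega
      · -- x ≤ mid with a gap: greedy picks index i, DP takes dp[i-2] + 1
        have hgap : i - prev > 1 := by omega
        rw [if_pos hgap]
        have h2' : p2 = cnt := by simpa [hprev] using h2
        refine ih (i + 1) (cnt + 1) i p1 (max p1 (p2 + 1)) ?_ ?_ (by omega)
        · omega
        · have hc : i = (i + 1) - 1 := by ring
          rw [if_pos hc]; omega
    · -- x > mid: both states carry over (DP: dp[i] = dp[i-1])
      have hx : x > mid := by omega
      simp only [if_neg hle, if_pos hx]
      refine ih (i + 1) cnt prev p1 p1 h1 ?_ (by omega)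
      have hne : ¬ prev = (i + 1) - 1 := by omega
      split_ifs at h2 with h
      · rw [if_neg hne]; omega
      · rw [if_neg hne]; omega

-- ===== VERDICT (by name: the statement is the Claim_ definition above) =====
theorem check_spec : Claim_equal_check := by
  intro nums mid k _
  unfold Spec_check check check_alt
  rw [checkGo_eq_foldl mid nums 0 0 (-2) 0 0 rfl (by norm_num) (by norm_num)]
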